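-- pv_equiv track=rewrite | github.com/LifeFi/nomad_aiengineer_1st | final-01/src/git_study/graph.py | _extract_file_paths_from_summary
-- ===== SOURCE A (Python) =====
-- def _extract_file_paths_from_summary(changed_files_summary: str) -> list[str]:
--     """changed_files_summary에서 실제 파일 경로만 파싱해 반환한다.
--
--     형식: "src/foo/bar.py | +10 -5 (lines changed: 15)"
--     """
--     paths: list[str] = []
--     for line in changed_files_summary.strip().splitlines():
--         if "|" in line:
--             path = line.split("|")[0].strip()
--             if path:
--                 paths.append(path)
--     return paths
-- ===== SOURCE B (Python) =====
-- def _extract_file_paths_from_summary(changed_files_summary: str) -> list[str]: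
--     """Single pass over the stripped string: a small state machine that keeps the
--     prefix before the first '|' of the current line and flushes it at each line break."""
--     s = changed_files_summary.strip()
--     paths: list[str] = []
--     prefix: list[str] = []
--     seen = False
--     i = 0
--     n = len(s)
--     while i < n:
--         c = s[i]
--         if c == '\n' or c == '\r':
--             if seen:
--                 p = ''.join(prefix).strip()
--                 if p:
--                     paths.append(p)
--             prefix = []
--             seen = False
--             if c == '\r' and i + 1 < n and s[i + 1] == '\n':
--                 i += 1
--         elif c == '|':
--             seen = True
--         elif not seen:
--             prefix.append(c)
--         i += 1
--     if seen:
--         p = ''.join(prefix).strip()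
--         if p:
--             paths.append(p)
--     return paths
-- ===== Notes on version B (the rewrite author's own statement) =====
-- stated objective: alternative
-- what changed: Replaces splitlines plus a per-line membership test and split at the pipe separator by a single left-to-right character scan: a state machine keeping the prefix before the first pipe and a seen-pipe flag, flushed at each line break, building no intermediate list of lines or split pieces.
import Mathlib
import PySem

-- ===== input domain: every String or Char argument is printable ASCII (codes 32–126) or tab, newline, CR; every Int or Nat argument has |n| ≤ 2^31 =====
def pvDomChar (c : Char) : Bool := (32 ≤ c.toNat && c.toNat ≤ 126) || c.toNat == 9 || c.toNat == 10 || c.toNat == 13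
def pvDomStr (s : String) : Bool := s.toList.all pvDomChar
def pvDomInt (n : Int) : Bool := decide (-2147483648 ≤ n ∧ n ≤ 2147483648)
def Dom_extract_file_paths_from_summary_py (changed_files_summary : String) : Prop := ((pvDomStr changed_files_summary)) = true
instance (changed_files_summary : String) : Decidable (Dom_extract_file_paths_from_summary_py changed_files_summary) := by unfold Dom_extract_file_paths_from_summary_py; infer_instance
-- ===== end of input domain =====

-- B replaces splitlines + per-line split('|') by a single left-to-right character scan
-- (state machine: prefix-before-first-pipe + seen-pipe flag, flushed at line breaks);
-- same return value on the ASCII domain, alternative single-pass structure.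

-- ===== PORT A =====
-- the body of A's for-loop (paths accumulator, one summary line)
def pvLineStep (paths : List String) (line : String) : List String :=
  if PySem.Str.isIn "|" line then
    -- line.split("|")[0] : the split list is never empty, so [0] never raises; .getD "" is unreachable
    let path := PySem.Str.strip (((PySem.List.pyGet? ((PySem.Str.split? line "|").getD []) (0 : Int))).getD "")
    if path ≠ "" then paths ++ [path] else paths
  else paths

def extract_file_paths_from_summary_py (changed_files_summary : String) : List String :=
  (PySem.Str.splitlines (PySem.Str.strip changed_files_summary)).foldl pvLineStep []

-- ===== PORT B =====
-- flush at a line break / end of input: keep the stripped prefix if a pipe was seen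
def pvFlush (pre : List Char) (seen : Bool) (paths : List String) : List String :=
  if seen then
    let p := PySem.Chars.strip pre
    if p ≠ [] then paths ++ [String.ofList p] else paths
  else paths

-- the while-loop of Source B: one pass over the characters ('\r\n' consumed as one break)
def pvScan : List Char → List Char → Bool → List String → List String
  | [], pre, seen, paths => pvFlush pre seen paths
  | '\r' :: '\n' :: rest, pre, seen, paths => pvScan rest [] false (pvFlush pre seen paths)
  | c :: rest, pre, seen, paths =>
    if c = '\n' ∨ c = '\r' then pvScan rest [] false (pvFlush pre seen paths)
    else if c = '|' then pvScan rest pre true paths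
    else if seen then pvScan rest pre seen paths
    else pvScan rest (pre ++ [c]) seen paths

def extract_file_paths_from_summary_py_alt (changed_files_summary : String) : List String :=
  pvScan (PySem.Str.strip changed_files_summary).toList [] false []

-- ===== PRECONDITION & SPEC =====
def Spec_extract_file_paths_from_summary_py (changed_files_summary : String) (out : List String) : Prop := out = extract_file_paths_from_summary_py_alt changed_files_summary
instance (changed_files_summary : String) (out : List String) : Decidable (Spec_extract_file_paths_from_summary_py changed_files_summary out) := by unfold Spec_extract_file_paths_from_summary_py; infer_instance

-- ===== CLAIM (what is proved, stated in full; the proofs are below) =====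
def Claim_equal_extract_file_paths_from_summary_py : Prop := ∀ (changed_files_summary : String), Dom_extract_file_paths_from_summary_py changed_files_summary → Spec_extract_file_paths_from_summary_py changed_files_summary (extract_file_paths_from_summary_py changed_files_summary)

-- ===== LEMMAS AND PROOFS =====

-- Python's line-break predicate, exactly as PySem.Chars.splitlines uses it
def pvIsB (c : Char) : Bool :=
  decide (c.toNat = 10) || decide (c.toNat = 13) || decide (c.toNat = 11) || decide (c.toNat = 12) ||
    decide (c.toNat = 28) || decide (c.toNat = 29) || decide (c.toNat = 30) || decide (c.toNat = 133) ||
    decide (c.toNat = 8232) || decide (c.toNat = 8233)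

-- structural reformulation of splitlines
def slines (isB : Char → Bool) : List Char → List (List Char)
  | [] => []
  | '\r' :: '\n' :: rest => [] :: slines isB rest
  | c :: rest => if isB c then [] :: slines isB rest else
      match slines isB rest with
      | [] => [[c]]
      | h :: t => (c :: h) :: t

def pvConsHead (c : Char) : List (List Char) → List (List Char)
  | [] => [[c]]
  | h :: t => (c :: h) :: t

def pvConsAll (pre : List Char) : List (List Char) → List (List Char)
  | [] => if pre = [] then [] else [pre]
  | h :: t => (pre ++ h) :: t

-- structural reformulation of split on a single-char separator
def pvSplit (sep : Char) : List Char → List (List Char)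
  | [] => [[]]
  | c :: rest => if c = sep then [] :: pvSplit sep rest else pvConsHead c (pvSplit sep rest)

theorem pvConsAll_nil (T : List (List Char)) : pvConsAll [] T = T := by
  cases T <;> simp [pvConsAll]

theorem go_cons (isB : Char → Bool) (c : Char) (rest cur : List Char) (acc : List (List Char))
    (hne : ∀ (r : List Char), c = '\r' → rest = '\n' :: r → False) :
    PySem.Chars.splitlines.go isB (c :: rest) cur acc =
      (if isB c then PySem.Chars.splitlines.go isB rest [] (cur.reverse :: acc)
       else PySem.Chars.splitlines.go isB rest (c :: cur) acc) := by
  rw [PySem.Chars.splitlines.go.eq_def]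
  split
  · rename_i h; exact absurd h (by simp)
  · rename_i h; injection h with h1 h2; exact (hne _ h1 h2).elim
  · rename_i h; injection h with h1 h2; subst h1; subst h2; rfl

theorem go_eq (isB : Char → Bool) (l : List Char) : ∀ (cur : List Char) (acc : List (List Char)),
    PySem.Chars.splitlines.go isB l cur acc = acc.reverse ++ pvConsAll cur.reverse (slines isB l) := by
  fun_induction slines isB l with
  | case1 => intro cur acc; by_cases h : cur = [] <;>
      simp [PySem.Chars.splitlines.go, pvConsAll, h]
  | case2 rest ih =>
      intro cur acc
      simp only [PySem.Chars.splitlines.go, ih]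
      cases slines isB rest <;> simp [pvConsAll]
  | case3 c rest hne hb ih =>
      intro cur acc
      rw [go_cons isB c rest cur acc hne, if_pos hb, ih]
      cases slines isB rest <;> simp [pvConsAll]
  | case4 c rest hne hb hnil ih =>
      intro cur acc
      rw [go_cons isB c rest cur acc hne, if_neg hb, ih, hnil]
      simp [pvConsAll]
  | case5 c rest hne hb h t hs ih =>
      intro cur acc
      rw [go_cons isB c rest cur acc hne, if_neg hb, ih, hs]
      simp [pvConsAll]

theorem splitlines_eq (l : List Char) : PySem.Chars.splitlines l = slines pvIsB l := by
  rw [show PySem.Chars.splitlines l = PySem.Chars.splitlines.go pvIsB l [] [] from rfl, go_eq]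
  simp [pvConsAll_nil]

theorem pvSplit_ne_nil (sep : Char) (l : List Char) : pvSplit sep l ≠ [] := by
  cases l with
  | nil => simp [pvSplit]
  | cons c rest =>
    simp only [pvSplit]
    split
    · simp
    · cases h : pvSplit sep rest <;> simp [pvConsHead]

theorem splitOn_go_eq (sep : Char) : ∀ (fuel : Nat) (l : List Char), l.length < fuel →
    ∀ (cur : List Char) (acc : List (List Char)),
    PySem.Chars.splitOn.go [sep] fuel l cur acc = acc.reverse ++ pvConsAll cur.reverse (pvSplit sep l) := by
  intro fuel
  induction fuel with
  | zero => intro l h; omega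
  | succ n ih =>
    intro l hl cur acc
    cases l with
    | nil => simp [PySem.Chars.splitOn.go, pvSplit, pvConsAll]
    | cons c rest =>
      rw [PySem.Chars.splitOn.go.eq_def]
      simp only [List.isPrefixOf, List.length_cons] at *
      by_cases h : c = sep
      · subst h
        simp only [BEq.rfl, Bool.true_and]
        rw [if_pos (by simp)]
        simp only [List.length_nil, List.drop_succ_cons, List.drop_zero]
        rw [ih rest (by omega)]
        simp only [pvSplit, pvConsAll]
        cases pvSplit c rest <;> simp
      · rw [if_neg (by simp [Ne.symm h]), ih rest (by omega)]
        simp only [pvSplit, if_neg h]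
        cases pvSplit sep rest <;> simp [pvConsAll, pvConsHead]

theorem splitOn_eq (sep : Char) (l : List Char) : PySem.Chars.splitOn l [sep] = pvSplit sep l := by
  unfold PySem.Chars.splitOn
  rw [splitOn_go_eq sep (l.length + 1) l (by omega)]
  simp [pvConsAll_nil]

theorem head?_pvSplit (sep : Char) (l : List Char) :
    (pvSplit sep l).head? = some (l.takeWhile (· ≠ sep)) := by
  induction l with
  | nil => simp [pvSplit]
  | cons c rest ih =>
    simp only [pvSplit]
    by_cases h : c = sep
    · simp [h]
    · cases hs : pvSplit sep rest with
      | nil => exact absurd hs (pvSplit_ne_nil sep rest)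
      | cons a t =>
        rw [hs] at ih
        simp only [List.head?_cons, Option.some.injEq] at ih
        simp [pvConsHead, h, ih]

theorem lineStep_eq (cur : List Char) (paths : List String) :
    pvLineStep paths (String.ofList cur)
      = pvFlush (cur.takeWhile (· ≠ '|')) (cur.any (· == '|')) paths := by
  unfold pvLineStep pvFlush
  by_cases h : '|' ∈ cur
  · have hIn : PySem.Str.isIn "|" (String.ofList cur) = true := by
      rw [PySem.Str.isIn_iff_infix]
      simpa using ((List.singleton_infix_iff '|' cur).mpr h)
    have hany : cur.any (· == '|') = true := by
      simp only [List.any_eq_true, beq_iff_eq]; exact ⟨'|', h, rfl⟩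
    rw [if_pos hIn, hany]
    have hsplit : PySem.Str.split? (String.ofList cur) "|"
        = some (List.map String.ofList (pvSplit '|' cur)) := by
      simp [PySem.Str.split?, PySem.Chars.split?, splitOn_eq]
    rw [hsplit]
    have hget : PySem.List.pyGet? (List.map String.ofList (pvSplit '|' cur)) (0 : Int)
        = some (String.ofList (cur.takeWhile (· ≠ '|'))) := by
      have h0 : (List.map String.ofList (pvSplit '|' cur)).head?
          = some (String.ofList (cur.takeWhile (· ≠ '|'))) := by
        rw [List.head?_map, head?_pvSplit]; rfl
      rw [show ((0 : Int)) = ((0 : Nat) : Int) from rfl, PySem.List.pyGet?_natCast]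
      rw [← List.head?_eq_getElem?]; exact h0
    rw [Option.getD_some, hget, Option.getD_some]
    have hstrip : PySem.Str.strip (String.ofList (cur.takeWhile (· ≠ '|')))
        = String.ofList (PySem.Chars.strip (cur.takeWhile (· ≠ '|'))) := by
      simp [PySem.Str.strip]
    rw [hstrip]
    by_cases hp : PySem.Chars.strip (cur.takeWhile (· ≠ '|')) = []
    · simp
    · simp
  · have hIn : PySem.Str.isIn "|" (String.ofList cur) = false := by
      rw [← Bool.not_eq_true, PySem.Str.isIn_iff_infix]
      simpa using fun hx => h ((List.singleton_infix_iff '|' cur).mp (by simpa using hx))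
    have hany : cur.any (· == '|') = false := by
      simp only [List.any_eq_false, beq_iff_eq]; intro x hx he; exact h (he ▸ hx)
    rw [hIn, hany]
    simp

theorem pvScan_cons (c : Char) (rest pre : List Char) (seen : Bool) (paths : List String)
    (hne : ∀ (r : List Char), c = '\r' → rest = '\n' :: r → False) :
    pvScan (c :: rest) pre seen paths =
      (if c = '\n' ∨ c = '\r' then pvScan rest [] false (pvFlush pre seen paths)
       else if c = '|' then pvScan rest pre true paths
       else if seen then pvScan rest pre seen paths
       else pvScan rest (pre ++ [c]) seen paths) := by
  rw [pvScan.eq_def]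
  split
  · rename_i h; exact absurd h (by simp)
  · rename_i h; injection h with h1 h2; exact (hne _ h1 h2).elim
  · rename_i h; injection h with h1 h2; subst h1; subst h2; rfl

theorem pvChar_eq_of_toNat {c d : Char} (h : c.toNat = d.toNat) : c = d :=
  Char.ext (UInt32.toNat_inj.mp h)

theorem break_char (c : Char) (hdom : pvDomChar c = true) (hb : pvIsB c = true) :
    c = '\n' ∨ c = '\r' := by
  simp only [pvDomChar, pvIsB, Bool.or_eq_true, Bool.and_eq_true, decide_eq_true_eq,
    beq_iff_eq] at hdom hb
  have h10 : c.toNat = 10 ∨ c.toNat = 13 := by omega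
  rcases h10 with h | h
  · exact Or.inl (pvChar_eq_of_toNat (by rw [h]; rfl))
  · exact Or.inr (pvChar_eq_of_toNat (by rw [h]; rfl))

theorem not_break_char (c : Char) (hb : ¬ pvIsB c = true) : ¬(c = '\n' ∨ c = '\r') := by
  rintro (rfl | rfl) <;> simp [pvIsB] at hb

theorem tw_self (cur : List Char) (h : cur.any (· == '|') = false) :
    cur.takeWhile (· ≠ '|') = cur := by
  induction cur with
  | nil => rfl
  | cons a t ih =>
    simp only [List.any_cons, Bool.or_eq_false_iff, beq_eq_false_iff_ne] at h
    rw [List.takeWhile_cons, if_pos (by simp [h.1]), ih h.2]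

theorem tw_append_pipe (cur : List Char) :
    (cur ++ ['|']).takeWhile (· ≠ '|') = cur.takeWhile (· ≠ '|') := by
  induction cur with
  | nil => simp
  | cons a t ih =>
    by_cases h : a = '|'
    · simp [h]
    · simp only [List.cons_append, List.takeWhile_cons, if_pos (by simp [h] : decide (a ≠ '|') = true)]
      rw [ih]

theorem tw_append_seen (cur : List Char) (c : Char) (h : cur.any (· == '|') = true) :
    (cur ++ [c]).takeWhile (· ≠ '|') = cur.takeWhile (· ≠ '|') := by
  induction cur with
  | nil => simp at h
  | cons a t ih =>
    simp only [List.any_cons, Bool.or_eq_true, beq_iff_eq] at h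
    by_cases ha : a = '|'
    · simp [ha]
    · rcases h with h | h
      · exact absurd h ha
      · simp only [List.cons_append, List.takeWhile_cons,
          if_pos (by simp [ha] : decide (a ≠ '|') = true)]
        rw [ih h]

theorem tw_append_unseen (cur : List Char) (c : Char) (hc : c ≠ '|')
    (h : cur.any (· == '|') = false) :
    (cur ++ [c]).takeWhile (· ≠ '|') = cur ++ [c] := by
  induction cur with
  | nil => simp [hc]
  | cons a t ih =>
    simp only [List.any_cons, Bool.or_eq_false_iff, beq_eq_false_iff_ne] at h
    simp only [List.cons_append, List.takeWhile_cons,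
      if_pos (by simp [h.1] : decide (a ≠ '|') = true)]
    rw [ih h.2]

theorem scan_eq_foldl (l : List Char) : ∀ (_ : ∀ c ∈ l, pvDomChar c = true)
    (cur : List Char) (paths : List String),
    pvScan l (cur.takeWhile (· ≠ '|')) (cur.any (· == '|')) paths
      = List.foldl pvLineStep paths (List.map String.ofList (pvConsAll cur (slines pvIsB l))) := by
  fun_induction slines pvIsB l with
  | case1 =>
      intro _ cur paths
      by_cases hc : cur = []
      · subst hc; simp [pvScan, pvConsAll, pvFlush]
      · rw [show pvConsAll cur [] = [cur] from by simp [pvConsAll, hc]]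
        simp only [List.map_cons, List.map_nil, List.foldl_cons, List.foldl_nil]
        rw [lineStep_eq]
        rfl
  | case2 rest ih =>
      intro hd cur paths
      have hdr : ∀ c ∈ rest, pvDomChar c = true := fun c hc => hd c (by simp [hc])
      simp only [pvScan]
      rw [show pvFlush (cur.takeWhile (· ≠ '|')) (cur.any (· == '|')) paths
            = pvLineStep paths (String.ofList cur) from (lineStep_eq cur paths).symm]
      have h1 := ih hdr [] (pvLineStep paths (String.ofList cur))
      simp only [List.takeWhile_nil, List.any_nil] at h1
      rw [h1, pvConsAll_nil]
      cases hs : slines pvIsB rest <;> simp [pvConsAll]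
  | case3 c rest hne hb ih =>
      intro hd cur paths
      have hdr : ∀ x ∈ rest, pvDomChar x = true := fun x hx => hd x (by simp [hx])
      have hbr := break_char c (hd c (by simp)) hb
      rw [pvScan_cons c rest _ _ _ hne, if_pos hbr]
      rw [show pvFlush (cur.takeWhile (· ≠ '|')) (cur.any (· == '|')) paths
            = pvLineStep paths (String.ofList cur) from (lineStep_eq cur paths).symm]
      have h1 := ih hdr [] (pvLineStep paths (String.ofList cur))
      simp only [List.takeWhile_nil, List.any_nil] at h1
      rw [h1, pvConsAll_nil]
      cases hs : slines pvIsB rest <;> simp [pvConsAll]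
  | case4 c rest hne hb hnil ih =>
      intro hd cur paths
      have hdr : ∀ x ∈ rest, pvDomChar x = true := fun x hx => hd x (by simp [hx])
      rw [pvScan_cons c rest _ _ _ hne, if_neg (not_break_char c hb)]
      by_cases hp : c = '|'
      · subst hp
        rw [if_pos rfl]
        have h1 := ih hdr (cur ++ ['|']) paths
        rw [tw_append_pipe, hnil] at h1
        simp only [List.any_append, List.any_cons, BEq.rfl, Bool.true_or,
          Bool.or_true] at h1
        rw [h1]
        simp [pvConsAll]
      · rw [if_neg hp]
        by_cases hseen : cur.any (· == '|') = true
        · rw [hseen, if_pos rfl]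
          have h1 := ih hdr (cur ++ [c]) paths
          rw [tw_append_seen cur c hseen, hnil] at h1
          simp only [List.any_append, List.any_cons, List.any_nil, Bool.or_false, hseen,
            Bool.true_or] at h1
          rw [h1]
          simp [pvConsAll]
        · rw [Bool.not_eq_true] at hseen
          rw [hseen, if_neg (by simp)]
          have h1 := ih hdr (cur ++ [c]) paths
          rw [tw_append_unseen cur c hp hseen, hnil] at h1
          simp only [List.any_append, List.any_cons, List.any_nil, Bool.or_false, hseen,
            Bool.false_or] at h1
          rw [show (c == '|') = false from by simp [hp]] at h1
          rw [tw_self cur hseen, h1]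
          simp [pvConsAll]
  | case5 c rest hne hb h t hs ih =>
      intro hd cur paths
      have hdr : ∀ x ∈ rest, pvDomChar x = true := fun x hx => hd x (by simp [hx])
      rw [pvScan_cons c rest _ _ _ hne, if_neg (not_break_char c hb)]
      by_cases hp : c = '|'
      · subst hp
        rw [if_pos rfl]
        have h1 := ih hdr (cur ++ ['|']) paths
        rw [tw_append_pipe, hs] at h1
        simp only [List.any_append, List.any_cons, BEq.rfl, Bool.true_or,
          Bool.or_true] at h1
        rw [h1]
        simp [pvConsAll]
      · rw [if_neg hp]
        by_cases hseen : cur.any (· == '|') = true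
        · rw [hseen, if_pos rfl]
          have h1 := ih hdr (cur ++ [c]) paths
          rw [tw_append_seen cur c hseen, hs] at h1
          simp only [List.any_append, List.any_cons, List.any_nil, Bool.or_false, hseen,
            Bool.true_or] at h1
          rw [h1]
          simp [pvConsAll]
        · rw [Bool.not_eq_true] at hseen
          rw [hseen, if_neg (by simp)]
          have h1 := ih hdr (cur ++ [c]) paths
          rw [tw_append_unseen cur c hp hseen, hs] at h1
          simp only [List.any_append, List.any_cons, List.any_nil, Bool.or_false, hseen,
            Bool.false_or] at h1
          rw [show (c == '|') = false from by simp [hp]] at h1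
          rw [tw_self cur hseen, h1]
          simp [pvConsAll]

theorem mem_strip (l : List Char) (c : Char) (h : c ∈ PySem.Chars.strip l) : c ∈ l := by
  simp only [PySem.Chars.strip, PySem.Chars.rstrip, PySem.Chars.lstrip] at h
  rw [List.mem_reverse] at h
  have h2 := (List.dropWhile_sublist _).subset h
  rw [List.mem_reverse] at h2
  exact (List.dropWhile_sublist _).subset h2

-- ===== VERDICT (by name: the statement is the Claim_ definition above) =====
theorem extract_file_paths_from_summary_py_spec : Claim_equal_extract_file_paths_from_summary_py := by
  unfold Claim_equal_extract_file_paths_from_summary_py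
  intro s hdom
  unfold Spec_extract_file_paths_from_summary_py
  unfold extract_file_paths_from_summary_py extract_file_paths_from_summary_py_alt
  have hL : (PySem.Str.strip s).toList = PySem.Chars.strip s.toList := by
    simp [PySem.Str.strip]
  have hdL : ∀ c ∈ (PySem.Str.strip s).toList, pvDomChar c = true := by
    intro c hc
    rw [hL] at hc
    have hmem := mem_strip s.toList c hc
    unfold Dom_extract_file_paths_from_summary_py pvDomStr at hdom
    exact List.all_eq_true.mp hdom c hmem
  have h1 := scan_eq_foldl (PySem.Str.strip s).toList hdL [] []
  simp only [List.takeWhile_nil, List.any_nil, pvConsAll_nil] at h1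
  rw [h1]
  unfold PySem.Str.splitlines
  rw [splitlines_eq]
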